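-- pv_equiv track=rewrite | github.com/ashishrb/hr_qna_poc | src/query/query_engine.py | normalize_search_query
-- ===== SOURCE A (Python) =====
-- def normalize_search_query(query: str) -> str:
--     """Normalize search query to handle plural/singular forms"""
--     query_normalized = query.lower()
--
--     # Common plural to singular conversions
--     plural_mappings = {
--         'developers': 'developer',
--         'directors': 'director',
--         'managers': 'manager',
--         'analysts': 'analyst',
--         'engineers': 'engineer',
--         'leads': 'lead'
--     }
--
--     for plural, singular in plural_mappings.items():
--         if plural in query_normalized:
--             query_normalized = query_normalized.replace(plural, singular)
--
--     return query_normalized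
-- ===== SOURCE B (Python) =====
-- def normalize_search_query(query: str) -> str:
--     """Normalize search query to handle plural/singular forms (single left-to-right pass)."""
--     q = query.lower()
--     plural_mappings = {
--         'developers': 'developer',
--         'directors': 'director',
--         'managers': 'manager',
--         'analysts': 'analyst',
--         'engineers': 'engineer',
--         'leads': 'lead'
--     }
--     out = []
--     i = 0
--     n = len(q)
--     while i < n:
--         for plural, singular in plural_mappings.items():
--             if q.startswith(plural, i):
--                 out.append(singular)
--                 i += len(plural)
--                 break
--         else:
--             out.append(q[i])
--             i += 1
--     return ''.join(out)
-- ===== Notes on version B (the rewrite author's own statement) =====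
-- stated objective: alternative
-- what changed: A lowercases and then runs six successive global str.replace scans over the whole string; B lowercases and makes one left-to-right scan that, at each position, emits the singular for the first matching plural (or copies the character), building the result in a single pass.
import Mathlib
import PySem

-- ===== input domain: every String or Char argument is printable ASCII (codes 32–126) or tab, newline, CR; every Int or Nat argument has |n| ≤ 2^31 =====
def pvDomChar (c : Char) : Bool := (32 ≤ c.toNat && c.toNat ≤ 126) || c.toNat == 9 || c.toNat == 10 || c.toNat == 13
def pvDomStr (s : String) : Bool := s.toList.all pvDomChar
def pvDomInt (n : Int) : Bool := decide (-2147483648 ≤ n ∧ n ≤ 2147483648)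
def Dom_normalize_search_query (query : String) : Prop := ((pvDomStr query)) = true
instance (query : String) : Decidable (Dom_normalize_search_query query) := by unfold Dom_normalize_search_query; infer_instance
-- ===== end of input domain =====

-- B replaces A's six chained global str.replace scans by one left-to-right scan that substitutes
-- the first matching plural at each position (objective: alternative single-pass algorithm, same result).

-- ===== PORT A =====
def normalize_search_query (query : String) : String :=
  let query_normalized := PySem.Str.lower query
  let plural_mappings : PySem.Dict String String := PySem.Dict.ofList
    [("developers", "developer"), ("directors", "director"), ("managers", "manager"),
     ("analysts", "analyst"), ("engineers", "engineer"), ("leads", "lead")]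
  plural_mappings.items.foldl
    (fun qn ps => if PySem.Str.isIn ps.1 qn then PySem.Str.replace qn ps.1 ps.2 else qn)
    query_normalized

-- ===== PORT B =====
def pvTbl : List (List Char × List Char) :=
  [("developers".toList, "developer".toList), ("directors".toList, "director".toList),
   ("managers".toList, "manager".toList), ("analysts".toList, "analyst".toList),
   ("engineers".toList, "engineer".toList), ("leads".toList, "lead".toList)]

def pvScan (T : List (List Char × List Char)) : List Char → List Char
  | [] => []
  | c :: t =>
    match T.find? (fun e => e.1.isPrefixOf (c :: t)) with
    | some e => e.2 ++ pvScan T (t.drop (e.1.length - 1))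
    | none => c :: pvScan T t
termination_by u => u.length
decreasing_by all_goals simp

def normalize_search_query_alt (query : String) : String :=
  String.ofList (pvScan pvTbl (PySem.Str.lower query).toList)

-- ===== PRECONDITION & SPEC =====
def Spec_normalize_search_query (query : String) (out : String) : Prop := out = normalize_search_query_alt query
instance (query : String) (out : String) : Decidable (Spec_normalize_search_query query out) := by unfold Spec_normalize_search_query; infer_instance

-- ===== CLAIM (what is proved, stated in full; the proofs are below) =====
def Claim_equal_normalize_search_query : Prop := ∀ (query : String), Dom_normalize_search_query query → Spec_normalize_search_query query (normalize_search_query query)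

-- ===== LEMMAS AND PROOFS =====
def pvRep (p s : List Char) : List Char → List Char
  | [] => []
  | c :: t => if p.isPrefixOf (c :: t) then s ++ pvRep p s (t.drop (p.length - 1)) else c :: pvRep p s t
termination_by u => u.length
decreasing_by all_goals simp

lemma pvRep_nil (p s : List Char) : pvRep p s [] = [] := by simp [pvRep]

lemma pvRep_cons_pos (p s : List Char) (c : Char) (t : List Char) (h : p <+: c :: t) :
    pvRep p s (c :: t) = s ++ pvRep p s (t.drop (p.length - 1)) := by
  rw [pvRep]; simp [List.isPrefixOf_iff_prefix.mpr h]

lemma pvRep_cons_neg (p s : List Char) (c : Char) (t : List Char) (h : ¬ p <+: c :: t) :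
    pvRep p s (c :: t) = c :: pvRep p s t := by
  rw [pvRep]; simp [h, List.isPrefixOf_iff_prefix]

lemma go_eq (old new : List Char) (hold : old ≠ []) :
    ∀ fuel (l acc : List Char), l.length ≤ fuel →
      PySem.Chars.replace.go old new fuel l acc = acc.reverse ++ pvRep old new l := by
  intro fuel
  induction fuel with
  | zero => intro l acc hl
            have : l = [] := by cases l <;> simp_all
            subst this; rw [PySem.Chars.replace.go]; simp [pvRep_nil]
  | succ n ih =>
    intro l acc hl
    cases l with
    | nil => rw [PySem.Chars.replace.go]; simp [pvRep_nil]; omega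
    | cons c t =>
      have hop : 0 < old.length := List.length_pos_of_ne_nil hold
      have hlt : t.length ≤ n := by simp at hl; omega
      rw [PySem.Chars.replace.go]
      by_cases h : old.isPrefixOf (c :: t)
      · simp only [h, if_true]
        have hpre : old <+: c :: t := List.isPrefixOf_iff_prefix.mp h
        have hdrop : List.drop old.length (c :: t) = List.drop (old.length - 1) t := by
          cases old with
          | nil => exact absurd rfl hold
          | cons o or => simp
        rw [hdrop, ih _ _ (by simp only [List.length_drop]; omega), pvRep_cons_pos _ _ _ _ hpre]
        simp
      · simp only [h]
        have hne : ¬ old <+: c :: t := fun hp => h (List.isPrefixOf_iff_prefix.mpr hp)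
        rw [ih _ _ hlt, pvRep_cons_neg _ _ _ _ hne]
        simp

lemma replace_eq_rep (s old new : List Char) (h : old ≠ []) :
    PySem.Chars.replace s old new = pvRep old new s := by
  rw [PySem.Chars.replace]
  simp [List.isEmpty_eq_false_iff.mpr h, go_eq old new h s.length s [] le_rfl]

lemma pvRep_id (p s : List Char) : ∀ u, ¬ p <:+: u → pvRep p s u = u := by
  intro u
  induction u with
  | nil => intro _; exact pvRep_nil p s
  | cons c t ih =>
    intro h
    have hpre : ¬ p <+: c :: t := fun hp => h hp.isInfix
    rw [pvRep_cons_neg _ _ _ _ hpre, ih (fun hi => h (List.infix_cons hi))]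

def pvNP (x y : List Char) : Prop := ¬ x <+: y ∧ ¬ y <+: x

lemma pvNP_no_prefix (x y z : List Char) (h : pvNP x y) : ¬ y <+: x ++ z := fun hp =>
  (List.prefix_or_prefix_of_prefix hp (List.prefix_append x z)).elim h.2 h.1

lemma pvRep_append (p s : List Char) : ∀ (a : List Char),
    (∀ m, m < a.length → pvNP (a.drop m) p) → ∀ z, pvRep p s (a ++ z) = a ++ pvRep p s z := by
  intro a
  induction a with
  | nil => intro _ z; rfl
  | cons c a' ih =>
    intro h z
    have h0 := h 0 (by simp)
    have hnp : ¬ p <+: (c :: a') ++ z := pvNP_no_prefix _ _ _ (by simpa using h0)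
    rw [List.cons_append, pvRep_cons_neg _ _ _ _ (by simpa using hnp),
        ih (fun m hm => by simpa using h (m + 1) (by simpa using hm)) z]
    rfl

lemma pvRep_head (p s : List Char) (hp : p ≠ []) (z : List Char) :
    pvRep p s (p ++ z) = s ++ pvRep p s z := by
  cases p with
  | nil => exact absurd rfl hp
  | cons c p' =>
    rw [List.cons_append, pvRep_cons_pos _ _ _ _ ⟨z, by simp⟩]
    have hl : (c :: p').length - 1 = p'.length := by simp
    rw [hl, List.drop_left]

lemma pvNoCreate (p s : List Char) (hs : s <+: p) (Q : List Char)
    (hsc : ∀ m, m < Q.length → Q.drop m = p ∨ ¬ s <+: Q.drop m) :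
    ∀ u m, m < Q.length → ¬ Q.drop m <+: u → ¬ Q.drop m <+: pvRep p s u := by
  intro u
  induction u with
  | nil => intro m hm hu; rw [pvRep_nil]; exact hu
  | cons c t ih =>
    intro m hm hu
    by_cases hpre : p <+: c :: t
    · rw [pvRep_cons_pos _ _ _ _ hpre]
      intro hcon
      rcases List.prefix_or_prefix_of_prefix hcon (List.prefix_append s _) with hqs | hsq
      · exact hu ((hqs.trans hs).trans hpre)
      · rcases hsc m hm with hqp | hns
        · exact hu (hqp ▸ hpre)
        · exact hns hsq
    · rw [pvRep_cons_neg _ _ _ _ hpre]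
      rw [List.drop_eq_getElem_cons hm] at hu ⊢
      intro hcon
      rw [List.cons_prefix_cons] at hcon
      obtain ⟨hqc, htail⟩ := hcon
      by_cases hm1 : m + 1 < Q.length
      · have hnt : ¬ Q.drop (m + 1) <+: t := fun hh => hu (List.cons_prefix_cons.mpr ⟨hqc, hh⟩)
        have := ih (m + 1) hm1 hnt
        rw [List.drop_eq_getElem_cons hm1] at this htail
        exact this htail
      · have hnil : Q.drop (m + 1) = [] := List.drop_eq_nil_of_le (by omega)
        exact hu (List.cons_prefix_cons.mpr ⟨hqc, by simp [hnil]⟩)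

def pvFold (T : List (List Char × List Char)) (u : List Char) : List Char :=
  T.foldl (fun q e => pvRep e.1 e.2 q) u

lemma pvFold_nil : ∀ (T : List (List Char × List Char)), pvFold T [] = [] := by
  intro T
  induction T with
  | nil => rfl
  | cons e T' ih => simp only [pvFold, List.foldl_cons, pvRep_nil]; exact ih

lemma pvFold_cons : ∀ (T : List (List Char × List Char)),
    (∀ e ∈ T, e.1 ≠ [] ∧ e.2 <+: e.1) →
    (∀ e ∈ T, ∀ e' ∈ T, ∀ m, m < e'.1.length → e'.1.drop m = e.1 ∨ ¬ e.2 <+: e'.1.drop m) →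
    ∀ c t, (∀ e ∈ T, ¬ e.1 <+: c :: t) → pvFold T (c :: t) = c :: pvFold T t := by
  intro T
  induction T with
  | nil => intro _ _ c t _; rfl
  | cons e T' ih =>
    intro hT hQ c t h
    have he := hT e (List.mem_cons_self)
    have h1 : ¬ e.1 <+: c :: t := h e (List.mem_cons_self)
    have hrw : pvRep e.1 e.2 (c :: t) = c :: pvRep e.1 e.2 t := pvRep_cons_neg _ _ _ _ h1
    have step : ∀ e' ∈ T', ¬ e'.1 <+: c :: pvRep e.1 e.2 t := by
      intro e' he'
      have h' : ¬ e'.1 <+: c :: t := h e' (List.mem_cons_of_mem _ he')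
      have hlen : 0 < e'.1.length :=
        List.length_pos_of_ne_nil ((hT e' (List.mem_cons_of_mem _ he')).1)
      have := pvNoCreate e.1 e.2 he.2 e'.1
        (fun m hm => hQ e (List.mem_cons_self) e' (List.mem_cons_of_mem _ he') m hm)
        (c :: t) 0 hlen (by simpa using h')
      rw [hrw] at this
      simpa using this
    simp only [pvFold, List.foldl_cons, hrw]
    have := ih (fun e' he' => hT e' (List.mem_cons_of_mem _ he'))
      (fun a ha b hb => hQ a (List.mem_cons_of_mem _ ha) b (List.mem_cons_of_mem _ hb))
      c (pvRep e.1 e.2 t) step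
    simpa [pvFold] using this

lemma pvFold_append : ∀ (T : List (List Char × List Char)) (a : List Char),
    (∀ e ∈ T, ∀ m, m < a.length → pvNP (a.drop m) e.1) →
    ∀ z, pvFold T (a ++ z) = a ++ pvFold T z := by
  intro T
  induction T with
  | nil => intro a _ z; rfl
  | cons e T' ih =>
    intro a h z
    simp only [pvFold, List.foldl_cons]
    rw [pvRep_append e.1 e.2 a (h e (List.mem_cons_self))]
    have := ih a (fun e' he' => h e' (List.mem_cons_of_mem _ he')) (pvRep e.1 e.2 z)
    simpa [pvFold] using this

lemma pvStep (T1 : List (List Char × List Char)) (e : List Char × List Char)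
    (T2 : List (List Char × List Char)) (he : e.1 ≠ [])
    (hA : ∀ e' ∈ T1, ∀ m, m < e.1.length → pvNP (e.1.drop m) e'.1)
    (hB : ∀ e' ∈ T2, ∀ m, m < e.2.length → pvNP (e.2.drop m) e'.1)
    (y : List Char) :
    pvFold (T1 ++ e :: T2) (e.1 ++ y) = e.2 ++ pvFold (T1 ++ e :: T2) y := by
  have h1 : pvFold T1 (e.1 ++ y) = e.1 ++ pvFold T1 y := pvFold_append T1 e.1 hA y
  calc pvFold (T1 ++ e :: T2) (e.1 ++ y)
      = pvFold T2 (pvRep e.1 e.2 (pvFold T1 (e.1 ++ y))) := by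
        simp [pvFold, List.foldl_append]
    _ = pvFold T2 (e.2 ++ pvRep e.1 e.2 (pvFold T1 y)) := by
        rw [h1, pvRep_head _ _ he]
    _ = e.2 ++ pvFold T2 (pvRep e.1 e.2 (pvFold T1 y)) := pvFold_append T2 e.2 hB _
    _ = e.2 ++ pvFold (T1 ++ e :: T2) y := by
        simp [pvFold, List.foldl_append]

lemma drop_of_append_cons (p y : List Char) (c : Char) (t : List Char)
    (h : p ++ y = c :: t) (hp : p ≠ []) : t.drop (p.length - 1) = y := by
  cases p with
  | nil => exact absurd rfl hp
  | cons c0 r =>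
    simp only [List.cons_append, List.cons.injEq] at h
    obtain ⟨_, ht⟩ := h
    simp only [List.length_cons, Nat.add_sub_cancel, ← ht, List.drop_left]

lemma pvCaseStep (T1 : List (List Char × List Char)) (e : List Char × List Char)
    (T2 : List (List Char × List Char)) (hsplit : pvTbl = T1 ++ e :: T2) (he : e.1 ≠ [])
    (hA : ∀ e' ∈ T1, ∀ m, m < e.1.length → pvNP (e.1.drop m) e'.1)
    (hB : ∀ e' ∈ T2, ∀ m, m < e.2.length → pvNP (e.2.drop m) e'.1)
    (c : Char) (t y : List Char) (hy : e.1 ++ y = c :: t)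
    (hfind : pvTbl.find? (fun d => d.1.isPrefixOf (c :: t)) = some e)
    (ihy : pvFold pvTbl y = pvScan pvTbl y) :
    pvFold pvTbl (c :: t) = pvScan pvTbl (c :: t) := by
  have hdrop : t.drop (e.1.length - 1) = y := drop_of_append_cons e.1 y c t hy he
  have hscan : pvScan pvTbl (c :: t) = e.2 ++ pvScan pvTbl y := by
    rw [pvScan, hfind]
    show e.2 ++ pvScan pvTbl (t.drop (e.1.length - 1)) = _
    rw [hdrop]
  rw [hscan, ← ihy, ← hy, hsplit]
  exact pvStep T1 e T2 he hA hB y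

lemma pvChain : ∀ (n : ℕ) (u : List Char), u.length ≤ n → pvFold pvTbl u = pvScan pvTbl u := by
  intro n
  induction n with
  | zero =>
    intro u hu
    have hnil : u = [] := by cases u <;> simp_all
    subst hnil
    rw [pvFold_nil, pvScan]
  | succ n ih =>
    intro u hu
    cases u with
    | nil => rw [pvFold_nil, pvScan]
    | cons c t =>
      have hlen : t.length ≤ n := by simpa [Nat.succ_le_succ_iff] using hu
      by_cases h1 : "developers".toList <+: c :: t
      · obtain ⟨y, hy⟩ := h1
        refine pvCaseStep [] ("developers".toList, "developer".toList) _ rfl (by decide)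
          (by simp only [pvNP]; decide) (by simp only [pvNP]; decide) c t y hy ?_ (ih y ?_)
        · unfold pvTbl
          rw [List.find?_cons_of_pos (p := fun d : List Char × List Char => d.1.isPrefixOf (c :: t)) (a := ("developers".toList, "developer".toList)) (List.isPrefixOf_iff_prefix.mpr (⟨y, hy⟩ : "developers".toList <+: c :: t))]
        · have := congrArg List.length hy; simp at this; omega
      ·
        by_cases h2 : "directors".toList <+: c :: t
        · obtain ⟨y, hy⟩ := h2
          refine pvCaseStep [("developers".toList, "developer".toList)] ("directors".toList, "director".toList) _ rfl (by decide)
            (by simp only [pvNP]; decide) (by simp only [pvNP]; decide) c t y hy ?_ (ih y ?_)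
          · unfold pvTbl
            rw [List.find?_cons_of_neg (p := fun d : List Char × List Char => d.1.isPrefixOf (c :: t)) (fun hb => h1 (List.isPrefixOf_iff_prefix.mp hb)), List.find?_cons_of_pos (p := fun d : List Char × List Char => d.1.isPrefixOf (c :: t)) (a := ("directors".toList, "director".toList)) (List.isPrefixOf_iff_prefix.mpr (⟨y, hy⟩ : "directors".toList <+: c :: t))]
          · have := congrArg List.length hy; simp at this; omega
        ·
          by_cases h3 : "managers".toList <+: c :: t
          · obtain ⟨y, hy⟩ := h3
            refine pvCaseStep [("developers".toList, "developer".toList), ("directors".toList, "director".toList)] ("managers".toList, "manager".toList) _ rfl (by decide)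
              (by simp only [pvNP]; decide) (by simp only [pvNP]; decide) c t y hy ?_ (ih y ?_)
            · unfold pvTbl
              rw [List.find?_cons_of_neg (p := fun d : List Char × List Char => d.1.isPrefixOf (c :: t)) (fun hb => h1 (List.isPrefixOf_iff_prefix.mp hb)), List.find?_cons_of_neg (p := fun d : List Char × List Char => d.1.isPrefixOf (c :: t)) (fun hb => h2 (List.isPrefixOf_iff_prefix.mp hb)), List.find?_cons_of_pos (p := fun d : List Char × List Char => d.1.isPrefixOf (c :: t)) (a := ("managers".toList, "manager".toList)) (List.isPrefixOf_iff_prefix.mpr (⟨y, hy⟩ : "managers".toList <+: c :: t))]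
            · have := congrArg List.length hy; simp at this; omega
          ·
            by_cases h4 : "analysts".toList <+: c :: t
            · obtain ⟨y, hy⟩ := h4
              refine pvCaseStep [("developers".toList, "developer".toList), ("directors".toList, "director".toList), ("managers".toList, "manager".toList)] ("analysts".toList, "analyst".toList) _ rfl (by decide)
                (by simp only [pvNP]; decide) (by simp only [pvNP]; decide) c t y hy ?_ (ih y ?_)
              · unfold pvTbl
                rw [List.find?_cons_of_neg (p := fun d : List Char × List Char => d.1.isPrefixOf (c :: t)) (fun hb => h1 (List.isPrefixOf_iff_prefix.mp hb)), List.find?_cons_of_neg (p := fun d : List Char × List Char => d.1.isPrefixOf (c :: t)) (fun hb => h2 (List.isPrefixOf_iff_prefix.mp hb)), List.find?_cons_of_neg (p := fun d : List Char × List Char => d.1.isPrefixOf (c :: t)) (fun hb => h3 (List.isPrefixOf_iff_prefix.mp hb)), List.find?_cons_of_pos (p := fun d : List Char × List Char => d.1.isPrefixOf (c :: t)) (a := ("analysts".toList, "analyst".toList)) (List.isPrefixOf_iff_prefix.mpr (⟨y, hy⟩ : "analysts".toList <+: c :: t))]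
              · have := congrArg List.length hy; simp at this; omega
            ·
              by_cases h5 : "engineers".toList <+: c :: t
              · obtain ⟨y, hy⟩ := h5
                refine pvCaseStep [("developers".toList, "developer".toList), ("directors".toList, "director".toList), ("managers".toList, "manager".toList), ("analysts".toList, "analyst".toList)] ("engineers".toList, "engineer".toList) _ rfl (by decide)
                  (by simp only [pvNP]; decide) (by simp only [pvNP]; decide) c t y hy ?_ (ih y ?_)
                · unfold pvTbl
                  rw [List.find?_cons_of_neg (p := fun d : List Char × List Char => d.1.isPrefixOf (c :: t)) (fun hb => h1 (List.isPrefixOf_iff_prefix.mp hb)), List.find?_cons_of_neg (p := fun d : List Char × List Char => d.1.isPrefixOf (c :: t)) (fun hb => h2 (List.isPrefixOf_iff_prefix.mp hb)), List.find?_cons_of_neg (p := fun d : List Char × List Char => d.1.isPrefixOf (c :: t)) (fun hb => h3 (List.isPrefixOf_iff_prefix.mp hb)), List.find?_cons_of_neg (p := fun d : List Char × List Char => d.1.isPrefixOf (c :: t)) (fun hb => h4 (List.isPrefixOf_iff_prefix.mp hb)), List.find?_cons_of_pos (p := fun d : List Char × List Char => d.1.isPrefixOf (c :: t)) (a := ("engineers".toList,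 "engineer".toList)) (List.isPrefixOf_iff_prefix.mpr (⟨y, hy⟩ : "engineers".toList <+: c :: t))]
                · have := congrArg List.length hy; simp at this; omega
              ·
                by_cases h6 : "leads".toList <+: c :: t
                · obtain ⟨y, hy⟩ := h6
                  refine pvCaseStep [("developers".toList, "developer".toList), ("directors".toList, "director".toList), ("managers".toList, "manager".toList), ("analysts".toList, "analyst".toList), ("engineers".toList, "engineer".toList)] ("leads".toList, "lead".toList) _ rfl (by decide)
                    (by simp only [pvNP]; decide) (by simp only [pvNP]; decide) c t y hy ?_ (ih y ?_)
                  · unfold pvTbl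
                    rw [List.find?_cons_of_neg (p := fun d : List Char × List Char => d.1.isPrefixOf (c :: t)) (fun hb => h1 (List.isPrefixOf_iff_prefix.mp hb)), List.find?_cons_of_neg (p := fun d : List Char × List Char => d.1.isPrefixOf (c :: t)) (fun hb => h2 (List.isPrefixOf_iff_prefix.mp hb)), List.find?_cons_of_neg (p := fun d : List Char × List Char => d.1.isPrefixOf (c :: t)) (fun hb => h3 (List.isPrefixOf_iff_prefix.mp hb)), List.find?_cons_of_neg (p := fun d : List Char × List Char => d.1.isPrefixOf (c :: t)) (fun hb => h4 (List.isPrefixOf_iff_prefix.mp hb)), List.find?_cons_of_neg (p := fun d : List Char × List Char => d.1.isPrefixOf (c :: t)) (fun hb => h5 (List.isPrefixOf_iff_prefix.mp hb)), List.find?_cons_of_pos (p := fun d : List Char × List Char => d.1.isPrefixOf (c :: t)) (a := ("leads".toList, "lead".toList)) (List.isPrefixOf_iff_prefix.mpr (⟨y, hy⟩ : "leads".toList <+: c :: t))]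
                  · have := congrArg List.length hy; simp at this; omega
                ·
                  have hfind : pvTbl.find? (fun d => d.1.isPrefixOf (c :: t)) = none := by
                    unfold pvTbl
                    rw [List.find?_cons_of_neg (p := fun d : List Char × List Char => d.1.isPrefixOf (c :: t)) (fun hb => h1 (List.isPrefixOf_iff_prefix.mp hb)), List.find?_cons_of_neg (p := fun d : List Char × List Char => d.1.isPrefixOf (c :: t)) (fun hb => h2 (List.isPrefixOf_iff_prefix.mp hb)), List.find?_cons_of_neg (p := fun d : List Char × List Char => d.1.isPrefixOf (c :: t)) (fun hb => h3 (List.isPrefixOf_iff_prefix.mp hb)), List.find?_cons_of_neg (p := fun d : List Char × List Char => d.1.isPrefixOf (c :: t)) (fun hb => h4 (List.isPrefixOf_iff_prefix.mp hb)), List.find?_cons_of_neg (p := fun d : List Char × List Char => d.1.isPrefixOf (c :: t)) (fun hb => h5 (List.isPrefixOf_iff_prefix.mp hb)), List.find?_cons_of_neg (p := fun d : List Char × List Char => d.1.isPrefixOf (c :: t)) (fun hb => h6 (List.isPrefixOf_iff_prefix.mp hb))]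
                    exact List.find?_nil
                  have hall : ∀ e ∈ pvTbl, ¬ e.1 <+: c :: t := by
                    intro e he
                    simp only [pvTbl, List.mem_cons, List.not_mem_nil, or_false] at he
                    rcases he with rfl | rfl | rfl | rfl | rfl | rfl
                    · exact h1
                    · exact h2
                    · exact h3
                    · exact h4
                    · exact h5
                    · exact h6
                  rw [pvFold_cons pvTbl (by decide) (by decide) c t hall, pvScan, hfind, ih t hlen]

lemma stepA (p s q : String) (hp : p.toList ≠ []) :
    (if PySem.Str.isIn p q then PySem.Str.replace q p s else q).toList
      = pvRep p.toList s.toList q.toList := by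
  by_cases hin : PySem.Str.isIn p q = true
  · rw [if_pos hin, PySem.Str.toList_replace, replace_eq_rep _ _ _ hp]
  · rw [if_neg hin]
    have hfalse : PySem.Chars.isIn p.toList q.toList = false := by
      rw [Bool.eq_false_iff]; intro hb; exact hin (by rw [PySem.Str.isIn_eq]; exact hb)
    rw [pvRep_id _ _ _ ((PySem.Chars.isIn_eq_false_iff _ _).mp hfalse)]

lemma foldIf_toList : ∀ (L : List (String × String)) (q : String),
    (∀ e ∈ L, e.1.toList ≠ []) →
    (L.foldl (fun qn ps => if PySem.Str.isIn ps.1 qn then PySem.Str.replace qn ps.1 ps.2 else qn) q).toList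
      = pvFold (L.map (fun e => (e.1.toList, e.2.toList))) q.toList := by
  intro L
  induction L with
  | nil => intro q _; rfl
  | cons e L' ih =>
    intro q h
    simp only [List.foldl_cons, List.map_cons]
    rw [ih _ (fun a ha => h a (List.mem_cons_of_mem _ ha))]
    have : pvFold ((e.1.toList, e.2.toList) :: L'.map (fun e => (e.1.toList, e.2.toList))) q.toList
        = pvFold (L'.map (fun e => (e.1.toList, e.2.toList))) (pvRep e.1.toList e.2.toList q.toList) := rfl
    rw [this, ← stepA e.1 e.2 q (h e List.mem_cons_self)]

-- ===== VERDICT (by name: the statement is the Claim_ definition above) =====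
theorem normalize_search_query_spec : Claim_equal_normalize_search_query := by
  intro query _
  unfold Spec_normalize_search_query
  apply String.toList_inj.mp
  have hitems : (PySem.Dict.ofList
      [("developers", "developer"), ("directors", "director"), ("managers", "manager"),
       ("analysts", "analyst"), ("engineers", "engineer"), ("leads", "lead")] : PySem.Dict String String).items
      = [("developers", "developer"), ("directors", "director"), ("managers", "manager"),
         ("analysts", "analyst"), ("engineers", "engineer"), ("leads", "lead")] := by decide
  show (let query_normalized := PySem.Str.lower query
        let plural_mappings : PySem.Dict String String := PySem.Dict.ofList
          [("developers", "developer"), ("directors", "director"), ("managers", "manager"),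
           ("analysts", "analyst"), ("engineers", "engineer"), ("leads", "lead")]
        plural_mappings.items.foldl
          (fun qn ps => if PySem.Str.isIn ps.1 qn then PySem.Str.replace qn ps.1 ps.2 else qn)
          query_normalized).toList = _
  simp only [hitems]
  rw [foldIf_toList _ _ (by decide)]
  have hmap : ([("developers", "developer"), ("directors", "director"), ("managers", "manager"),
      ("analysts", "analyst"), ("engineers", "engineer"), ("leads", "lead")] : List (String × String)).map
      (fun e => (e.1.toList, e.2.toList)) = pvTbl := by decide
  rw [hmap, pvChain (PySem.Str.lower query).toList.length _ le_rfl]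
  show _ = (String.ofList (pvScan pvTbl (PySem.Str.lower query).toList)).toList
  simp
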